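-- pv_equiv track=rewrite | github.com/sdfim/leetcode-solutions | binary-search/MEDIUM/minimize_the_maximum_of_two_arrays.py | minimizeSet
-- ===== SOURCE A (Python) =====
-- import math
--
-- def minimizeSet(divisor1: int, divisor2: int, uniqueCnt1: int, uniqueCnt2: int) -> int:
--     # Binary search for the maximum value X.
--     # We need to pick uniqueCnt1 numbers for Set1 and uniqueCnt2 for Set2 from range [1, X].
--     # Set1 cannot contain multiples of divisor1.
--     # Set2 cannot contain multiples of divisor2.
--
--     # Count available numbers in [1, X]:
--     # A = numbers NOT divisible by divisor1. (Can go to Set1)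
--     # B = numbers NOT divisible by divisor2. (Can go to Set2)
--     # C = numbers NOT divisible by LCM(divisor1, divisor2). (Can go to Set1 OR Set2)
--
--     # Wait.
--     # Total items in [1, X] available for Set1: X - X // divisor1.
--     # Total items in [1, X] available for Set2: X - X // divisor2.
--     # Items available for BOTH? No.
--     # Items excluded from Set1 (div by d1) but usable in Set2? (div by d1 but NOT d2).
--     # Items excluded from Set2 (div by d2) but usable in Set1? (div by d2 but NOT d1).
--     # Items usable in BOTH (div by neither d1 nor d2). Count = X - X // d1 - X // d2 + X // lcm.
--     # Actually simple logic:
--     # We must satisfy: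
--     # 1. Available for Set1 >= uniqueCnt1.
--     # 2. Available for Set2 >= uniqueCnt2.
--     # 3. Total Available (in union) >= uniqueCnt1 + uniqueCnt2.
--     # Total available = X - (numbers divisible by BOTH d1 and d2).
--     # i.e., X - X // lcm.
--
--     lcm_val = math.lcm(divisor1, divisor2)
--
--     def check(x):
--         cnt1 = x - x // divisor1
--         cnt2 = x - x // divisor2
--         total = x - x // lcm_val
--         return cnt1 >= uniqueCnt1 and cnt2 >= uniqueCnt2 and total >= uniqueCnt1 + uniqueCnt2
--
--     left, right = 1, 10**10
--     ans = right
--     while left <= right: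
--         mid = (left + right) // 2
--         if check(mid):
--             ans = mid
--             right = mid - 1
--         else:
--             left = mid + 1
--     return ans
-- ===== SOURCE B (Python) =====
-- import math
--
-- def minimizeSet(divisor1: int, divisor2: int, uniqueCnt1: int, uniqueCnt2: int) -> int:
--     # Closed form: invert each monotone count constraint directly.
--     # least(d, c) = smallest x >= 1 such that the count of numbers in
--     # [1, x] not divisible by d (i.e. x - x // d) reaches c.
--     def least(d, c):
--         return max(1, c + (c - 1) // (d - 1))
--
--     lcm = math.lcm(divisor1, divisor2)
--     return max(least(divisor1, uniqueCnt1),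
--                least(divisor2, uniqueCnt2),
--                least(lcm, uniqueCnt1 + uniqueCnt2))
-- ===== Notes on version B (the rewrite author's own statement) =====
-- stated objective: faster
-- what changed: Replaces the binary search over [1, 10^10] with a closed-form inversion of each of the three monotone count constraints (the least x with x - x//d >= c is max(1, c + (c-1)//(d-1))); Pre_ excludes divisor 0, where A raises ZeroDivisionError, and the degenerate cases divisor = 1 or both divisors = -1 (lcm 1), where no x can ever satisfy the constraints, A returns its 10^10 search cap and B's closed form divides by zero.
-- outside the precondition, e.g. on minimizeSet(1, 2, 0, 1): A returns 1, B raises ZeroDivisionError; on minimizeSet(1, 2, 1, 1): A returns 10000000000, B raises ZeroDivisionError; on minimizeSet(-1, -1, 1, 1): A returns 10000000000, B raises ZeroDivisionError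
import Mathlib
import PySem

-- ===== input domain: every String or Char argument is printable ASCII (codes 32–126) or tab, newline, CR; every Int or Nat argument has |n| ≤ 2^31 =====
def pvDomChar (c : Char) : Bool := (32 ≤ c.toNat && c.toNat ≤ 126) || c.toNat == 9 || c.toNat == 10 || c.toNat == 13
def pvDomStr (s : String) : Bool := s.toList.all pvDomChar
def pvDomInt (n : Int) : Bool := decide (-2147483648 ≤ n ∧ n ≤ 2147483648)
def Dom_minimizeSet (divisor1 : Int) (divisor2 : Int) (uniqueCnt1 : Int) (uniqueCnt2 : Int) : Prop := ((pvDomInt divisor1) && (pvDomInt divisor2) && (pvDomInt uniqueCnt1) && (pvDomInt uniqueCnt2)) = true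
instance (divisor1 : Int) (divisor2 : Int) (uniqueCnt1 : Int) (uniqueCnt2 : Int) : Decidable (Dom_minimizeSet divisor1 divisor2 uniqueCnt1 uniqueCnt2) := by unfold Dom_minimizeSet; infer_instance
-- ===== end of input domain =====

-- B replaces A's binary search over [1, 10^10] by a closed-form inversion of the three
-- monotone count constraints (objective: faster, O(1) arithmetic vs ~34 search steps).

-- ===== PORT A =====
def pvCheck (divisor1 divisor2 lcmVal uniqueCnt1 uniqueCnt2 x : Int) : Bool :=
  let cnt1 := x - PySem.Int.floordiv x divisor1
  let cnt2 := x - PySem.Int.floordiv x divisor2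
  let total := x - PySem.Int.floordiv x lcmVal
  decide (uniqueCnt1 ≤ cnt1) && decide (uniqueCnt2 ≤ cnt2) && decide (uniqueCnt1 + uniqueCnt2 ≤ total)

def pvLoop (chk : Int → Bool) (left right ans : Int) : Int :=
  if h : left ≤ right then
    if chk (PySem.Int.floordiv (left + right) 2) then
      pvLoop chk left (PySem.Int.floordiv (left + right) 2 - 1) (PySem.Int.floordiv (left + right) 2)
    else
      pvLoop chk (PySem.Int.floordiv (left + right) 2 + 1) right ans
  else ans
termination_by (right + 1 - left).toNat
decreasing_by
  · have hb := PySem.Int.floordiv_two_mid_bounds h; omega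
  · have hb := PySem.Int.floordiv_two_mid_bounds h; omega

def minimizeSet (divisor1 : Int) (divisor2 : Int) (uniqueCnt1 : Int) (uniqueCnt2 : Int) : Int :=
  let lcmVal : Int := (Int.lcm divisor1 divisor2 : Int)
  pvLoop (pvCheck divisor1 divisor2 lcmVal uniqueCnt1 uniqueCnt2) 1 10000000000 10000000000

-- ===== PORT B =====
def pvLeast (d c : Int) : Int :=
  max 1 (c + PySem.Int.floordiv (c - 1) (d - 1))

def minimizeSet_alt (divisor1 : Int) (divisor2 : Int) (uniqueCnt1 : Int) (uniqueCnt2 : Int) : Int :=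
  let lcmVal : Int := (Int.lcm divisor1 divisor2 : Int)
  max (max (pvLeast divisor1 uniqueCnt1) (pvLeast divisor2 uniqueCnt2))
      (pvLeast lcmVal (uniqueCnt1 + uniqueCnt2))

-- ===== PRECONDITION & SPEC =====
-- Pre_ excludes divisor 0, where A raises ZeroDivisionError, and the degenerate cases
-- divisor = 1 or both divisors = -1 (lcm 1), where no x ever satisfies the constraints,
-- A returns its 10^10 search cap and B's closed form raises ZeroDivisionError.
def Pre_minimizeSet (divisor1 : Int) (divisor2 : Int) (uniqueCnt1 : Int) (uniqueCnt2 : Int) : Prop :=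
  divisor1 ≠ 0 ∧ divisor2 ≠ 0 ∧ divisor1 ≠ 1 ∧ divisor2 ≠ 1 ∧ ¬(divisor1 = -1 ∧ divisor2 = -1)
instance (divisor1 : Int) (divisor2 : Int) (uniqueCnt1 : Int) (uniqueCnt2 : Int) : Decidable (Pre_minimizeSet divisor1 divisor2 uniqueCnt1 uniqueCnt2) := by unfold Pre_minimizeSet; infer_instance
def pvWitness_minimizeSet : Int × Int × Int × Int := (2, 7, 1, 3)

def Spec_minimizeSet (divisor1 : Int) (divisor2 : Int) (uniqueCnt1 : Int) (uniqueCnt2 : Int) (out : Int) : Prop := out = minimizeSet_alt divisor1 divisor2 uniqueCnt1 uniqueCnt2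
instance (divisor1 : Int) (divisor2 : Int) (uniqueCnt1 : Int) (uniqueCnt2 : Int) (out : Int) : Decidable (Spec_minimizeSet divisor1 divisor2 uniqueCnt1 uniqueCnt2 out) := by unfold Spec_minimizeSet; infer_instance

-- ===== CLAIM =====
def Claim_equal_minimizeSet : Prop := ∀ (divisor1 : Int) (divisor2 : Int) (uniqueCnt1 : Int) (uniqueCnt2 : Int), Dom_minimizeSet divisor1 divisor2 uniqueCnt1 uniqueCnt2 → Pre_minimizeSet divisor1 divisor2 uniqueCnt1 uniqueCnt2 → Spec_minimizeSet divisor1 divisor2 uniqueCnt1 uniqueCnt2 (minimizeSet divisor1 divisor2 uniqueCnt1 uniqueCnt2)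

-- ===== LEMMAS AND PROOFS =====

-- pvLeast d c is the least x ≥ 1 from which the count x - x//d is at least c (d ∉ {0, 1})
theorem pvLeast_iff (d c x : Int) (hd0 : d ≠ 0) (hd1 : d ≠ 1) (hx : 1 ≤ x) :
    (c ≤ x - PySem.Int.floordiv x d) ↔ pvLeast d c ≤ x := by
  unfold pvLeast
  rcases lt_or_gt_of_ne hd0 with hneg | hpos
  · -- d ≤ -1
    have e : PySem.Int.floordiv x d = PySem.Int.floordiv (-x) (-d) := by
      rw [← PySem.Int.floordiv_neg_neg x d]
    have e2 : PySem.Int.floordiv (c - 1) (d - 1) = PySem.Int.floordiv (1 - c) (1 - d) := by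
      rw [← PySem.Int.floordiv_neg_neg (c - 1) (d - 1)]; ring_nf
    rw [e, e2]
    set a := -d with ha
    have ha1 : 1 ≤ a := by omega
    set m := PySem.Int.floordiv (-x) a with hm
    set q := PySem.Int.floordiv (1 - c) (1 - d) with hq
    have h1d : (1 : Int) - d = a + 1 := by omega
    have hm1 : m * a ≤ -x := (PySem.Int.le_floordiv_iff_mul_le (by omega)).mp (le_refl m)
    have hm2 : -x < (m + 1) * a := (PySem.Int.floordiv_lt_iff_lt_mul (by omega)).mp (by omega)
    have hq1 : q * (a + 1) ≤ 1 - c := by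
      have h := (PySem.Int.le_floordiv_iff_mul_le (a := 1 - c) (b := 1 - d) (by omega)).mp (le_refl q)
      rw [h1d] at h; exact h
    have hq2 : 1 - c < (q + 1) * (a + 1) := by
      have h := (PySem.Int.floordiv_lt_iff_lt_mul (a := 1 - c) (b := 1 - d) (by omega)).mp
        (show q < q + 1 by omega)
      rw [h1d] at h; exact h
    by_cases hc : c ≤ 0
    · -- both sides hold
      have hq0 : 0 ≤ q := (PySem.Int.le_floordiv_iff_mul_le (by omega)).mpr (by omega)
      have hqle : q ≤ 1 - c := by nlinarith
      have hmneg : m ≤ -1 := by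
        have := (PySem.Int.floordiv_lt_iff_lt_mul (a := -x) (b := a) (by omega)).mpr
          (show -x < 0 * a by omega)
        omega
      constructor
      · intro _; exact max_le hx (by omega)
      · intro _; omega
    · -- 1 ≤ c
      have hc1 : 1 ≤ c := by omega
      have ht1 : 1 ≤ c + q := by nlinarith
      rw [max_eq_right ht1]
      constructor
      · intro h
        by_contra hcon
        have hqb : x - c + 1 ≤ q := by omega
        have hmb : m ≤ x - c := by omega
        nlinarith
      · intro h
        by_contra hcon
        have hmb : x - c + 1 ≤ m := by omega
        have hqb : q ≤ x - c := by omega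
        nlinarith
  · -- d ≥ 2
    have hd2 : 2 ≤ d := by omega
    set m := PySem.Int.floordiv x d with hm
    set k := PySem.Int.floordiv (c - 1) (d - 1) with hk
    have hm1 : m * d ≤ x := (PySem.Int.le_floordiv_iff_mul_le (by omega)).mp (le_refl m)
    have hm2 : x < (m + 1) * d := (PySem.Int.floordiv_lt_iff_lt_mul (by omega)).mp (by omega)
    have hk1 : k * (d - 1) ≤ c - 1 := (PySem.Int.le_floordiv_iff_mul_le (by omega)).mp (le_refl k)
    have hk2 : c - 1 < (k + 1) * (d - 1) := (PySem.Int.floordiv_lt_iff_lt_mul (by omega)).mp (by omega)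
    have hm0 : 0 ≤ m := (PySem.Int.le_floordiv_iff_mul_le (by omega)).mpr (by omega)
    by_cases hc : c ≤ 0
    · have hkneg : k ≤ -1 := by
        have := (PySem.Int.floordiv_lt_iff_lt_mul (a := c - 1) (b := d - 1) (by omega)).mpr
          (show c - 1 < 0 * (d - 1) by omega)
        omega
      constructor
      · intro _; exact max_le hx (by omega)
      · intro _; nlinarith
    · have hc1 : 1 ≤ c := by omega
      have hk0 : 0 ≤ k := (PySem.Int.le_floordiv_iff_mul_le (by omega)).mpr (by omega)
      rw [max_eq_right (by omega)]
      constructor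
      · intro h
        have hkm : k ≤ m := by nlinarith
        omega
      · intro h
        by_contra hcon
        have hmk : m ≤ k := by nlinarith
        omega

theorem pvLeast_pos (d c : Int) : 1 ≤ pvLeast d c := le_max_left 1 _

-- within 32-bit counts the three thresholds never exceed A's search cap of 10^10
theorem pvLeast_le (d c : Int) (hd0 : d ≠ 0) (hd1 : d ≠ 1) (hc : c ≤ 4294967296) :
    pvLeast d c ≤ 10000000000 := by
  unfold pvLeast
  rcases lt_or_gt_of_ne hd0 with hneg | hpos
  · have hq : PySem.Int.floordiv (c - 1) (d - 1) = PySem.Int.floordiv (1 - c) (1 - d) := by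
      rw [← PySem.Int.floordiv_neg_neg (c - 1) (d - 1)]; ring_nf
    rw [hq]
    set q := PySem.Int.floordiv (1 - c) (1 - d) with hqd
    by_cases hc1 : 1 ≤ c
    · have : q < 1 := (PySem.Int.floordiv_lt_iff_lt_mul (by omega)).mpr (by nlinarith)
      simp only [max_le_iff]; omega
    · have hq1 : q * (1 - d) ≤ 1 - c :=
        (PySem.Int.le_floordiv_iff_mul_le (by omega)).mp (le_refl q)
      have hq0 : 0 ≤ q := (PySem.Int.le_floordiv_iff_mul_le (by omega)).mpr (by omega)
      have : q ≤ 1 - c := by nlinarith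
      simp only [max_le_iff]; omega
  · have hd2 : 2 ≤ d := by omega
    set k := PySem.Int.floordiv (c - 1) (d - 1) with hkd
    by_cases hc1 : 1 ≤ c
    · have : k < c := (PySem.Int.floordiv_lt_iff_lt_mul (by omega)).mpr (by nlinarith)
      simp only [max_le_iff]; omega
    · have : k < 0 := (PySem.Int.floordiv_lt_iff_lt_mul (by omega)).mpr (by omega)
      simp only [max_le_iff]; omega

-- A's binary search over [l, r] for a threshold predicate (p x ↔ N ≤ x) lands on max l N, capped by r
theorem pvLoop_eq (p : Int → Bool) (N : Int)
    (hp : ∀ x : Int, 1 ≤ x → x ≤ 10000000000 → (p x = true ↔ N ≤ x))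
    (l r ans : Int) (hl : 1 ≤ l) (hr : r ≤ 10000000000) :
    pvLoop p l r ans = if l ≤ r ∧ N ≤ r then max l N else ans := by
  fun_induction pvLoop p l r ans with
  | case1 l r ans h hc ih =>
    have hb := PySem.Int.floordiv_two_mid_bounds h
    set m := PySem.Int.floordiv (l + r) 2 with hm
    have hNm : N ≤ m := (hp m (by omega) (by omega)).mp hc
    rw [ih hl (by omega)]
    split <;> split <;> omega
  | case2 l r ans h hc ih =>
    have hb := PySem.Int.floordiv_two_mid_bounds h
    set m := PySem.Int.floordiv (l + r) 2 with hm
    have hNm : ¬ (N ≤ m) := fun hx => hc ((hp m (by omega) (by omega)).mpr hx)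
    rw [ih (by omega) hr]
    split <;> split <;> omega
  | case3 l r ans h =>
    rw [if_neg (by omega)]

-- ===== VERDICT =====
theorem minimizeSet_spec : Claim_equal_minimizeSet := by
  intro d1 d2 c1 c2 hdom hpre
  obtain ⟨h10, h20, h11, h21, hmm⟩ := hpre
  have hdomc : pvDomInt c1 = true ∧ pvDomInt c2 = true := by
    simp only [Dom_minimizeSet, Bool.and_eq_true] at hdom; tauto
  have hc1 : c1 ≤ 2147483648 := by
    have := hdomc.1; simp [pvDomInt] at this; omega
  have hc2 : c2 ≤ 2147483648 := by
    have := hdomc.2; simp [pvDomInt] at this; omega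
  simp only [Spec_minimizeSet, minimizeSet, minimizeSet_alt]
  set L : Int := (Int.lcm d1 d2 : Int) with hLdef
  have hLne : Int.lcm d1 d2 ≠ 0 := Int.lcm_ne_zero h10 h20
  have hL0 : L ≠ 0 := by simp [hLdef]; omega
  have hL1 : L ≠ 1 := by
    intro h
    have : Int.lcm d1 d2 = 1 := by omega
    have hd1dvd : d1.natAbs ∣ Int.lcm d1 d2 := Nat.dvd_lcm_left _ _
    have hd2dvd : d2.natAbs ∣ Int.lcm d1 d2 := Nat.dvd_lcm_right _ _
    rw [this] at hd1dvd hd2dvd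
    have e1 : d1.natAbs = 1 := Nat.eq_one_of_dvd_one hd1dvd
    have e2 : d2.natAbs = 1 := Nat.eq_one_of_dvd_one hd2dvd
    have : d1 = 1 ∨ d1 = -1 := Int.natAbs_eq_iff.mp e1
    have : d2 = 1 ∨ d2 = -1 := Int.natAbs_eq_iff.mp e2
    tauto
  set N : Int := max (max (pvLeast d1 c1) (pvLeast d2 c2)) (pvLeast L (c1 + c2)) with hN
  have hNpos : 1 ≤ N := le_trans (pvLeast_pos L (c1 + c2)) (le_max_right _ _)
  have hNle : N ≤ 10000000000 := by
    have b1 := pvLeast_le d1 c1 h10 h11 (by omega)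
    have b2 := pvLeast_le d2 c2 h20 h21 (by omega)
    have b3 := pvLeast_le L (c1 + c2) hL0 hL1 (by omega)
    simp only [hN, max_le_iff]; omega
  have hp : ∀ x : Int, 1 ≤ x → x ≤ 10000000000 → (pvCheck d1 d2 L c1 c2 x = true ↔ N ≤ x) := by
    intro x hx _
    simp only [pvCheck, Bool.and_eq_true, decide_eq_true_eq, hN, max_le_iff]
    rw [pvLeast_iff d1 c1 x h10 h11 hx, pvLeast_iff d2 c2 x h20 h21 hx,
        pvLeast_iff L (c1 + c2) x hL0 hL1 hx]
  rw [pvLoop_eq (pvCheck d1 d2 L c1 c2) N hp 1 10000000000 10000000000 (by norm_num) (by norm_num)]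
  rw [if_pos ⟨by norm_num, hNle⟩]
  omega
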